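-- pv_equiv track=rewrite | github.com/rohitbhalke/Data-Mining-CSE601 | part2/TemplateQueries.py | template_2_queries_find_rules
-- ===== SOURCE A (Python) =====
-- def template_2_queries_find_rules(result, item, rules):
--     query_param = item.split(" ")
--     key = query_param[0]
--     req_count = query_param[1]
--     for rule in rules:
--         head_count = str(len(rule[0]))
--         tail_count = str(len(rule[1]))
--         rule_count = head_count + tail_count
--         if (key == "RULE") and (rule_count == req_count):
--             result.append(rule)
--         elif (key == "HEAD") and (head_count == req_count):
--             result.append(rule)
--         elif (key == "BODY") and (tail_count == req_count):
--             result.append(rule)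
--         else:
--             pass
--     return result
-- ===== SOURCE B (Python) =====
-- def template_2_queries_find_rules(result, item, rules):
--     query_param = item.split(" ")
--     key = query_param[0]
--     req_count = query_param[1]
--     # Stage 1: tag every rule with all three (mode, count-string) keys.
--     pairs = [(tag, rule)
--              for rule in rules
--              for tag in (("RULE", str(len(rule[0])) + str(len(rule[1]))),
--                          ("HEAD", str(len(rule[0]))),
--                          ("BODY", str(len(rule[1]))))]
--     # Stage 2: group into an inverted index  (mode, count) -> rules in order.
--     index = {}
--     for tag, rule in pairs:
--         index.setdefault(tag, []).append(rule)
--     # Stage 3: the query is answered by a single lookup, no per-rule comparison.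
--     result.extend(index.get((key, req_count), []))
--     return result
-- ===== Notes on version B (the rewrite author's own statement) =====
-- stated objective: alternative
-- what changed: Instead of scanning rules and testing each against the query with an elif cascade, B first builds an inverted index mapping every (mode, count-string) tag to its rules via setdefault grouping, then answers the query with a single dictionary lookup.
import Mathlib
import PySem

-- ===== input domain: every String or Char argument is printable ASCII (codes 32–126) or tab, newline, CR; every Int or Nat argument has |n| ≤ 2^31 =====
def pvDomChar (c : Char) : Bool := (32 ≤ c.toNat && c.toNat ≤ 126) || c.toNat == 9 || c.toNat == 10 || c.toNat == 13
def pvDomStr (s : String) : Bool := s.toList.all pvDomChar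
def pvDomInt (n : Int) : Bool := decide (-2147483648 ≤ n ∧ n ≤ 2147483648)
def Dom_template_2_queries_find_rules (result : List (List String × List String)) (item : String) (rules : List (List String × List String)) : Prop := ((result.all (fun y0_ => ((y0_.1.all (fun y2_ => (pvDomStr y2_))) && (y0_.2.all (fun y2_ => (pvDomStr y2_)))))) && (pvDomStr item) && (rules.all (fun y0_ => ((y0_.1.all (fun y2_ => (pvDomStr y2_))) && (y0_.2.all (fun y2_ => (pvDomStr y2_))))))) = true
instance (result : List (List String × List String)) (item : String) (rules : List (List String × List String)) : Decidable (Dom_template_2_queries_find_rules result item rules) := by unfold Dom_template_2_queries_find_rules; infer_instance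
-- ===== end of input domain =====

-- B builds an inverted index (mode, count-string) → rules, then answers the query by one lookup,
-- instead of A's per-rule elif cascade; same return value. Both A and B mutate `result` in place
-- (append/extend) with the same final contents; the equivalence proved is about the return value.
-- ===== PORT A =====
def template_2_queries_find_rules (result : List (List String × List String)) (item : String) (rules : List (List String × List String)) : List (List String × List String) :=
  let query_param := (PySem.Str.split? item " ").getD []
  let key := (PySem.List.pyGet? query_param 0).getD ""
  let req_count := (PySem.List.pyGet? query_param 1).getD ""
  rules.foldl (fun res rule =>
    let head_count := PySem.Int.toStr (rule.1.length : Int)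
    let tail_count := PySem.Int.toStr (rule.2.length : Int)
    let rule_count := head_count ++ tail_count
    if key = "RULE" ∧ rule_count = req_count then res ++ [rule]
    else if key = "HEAD" ∧ head_count = req_count then res ++ [rule]
    else if key = "BODY" ∧ tail_count = req_count then res ++ [rule]
    else res) result

-- ===== PORT B =====
def template_2_queries_find_rules_alt (result : List (List String × List String)) (item : String) (rules : List (List String × List String)) : List (List String × List String) :=
  let query_param := (PySem.Str.split? item " ").getD []
  let key := (PySem.List.pyGet? query_param 0).getD ""
  let req_count := (PySem.List.pyGet? query_param 1).getD ""
  -- Stage 1: tag every rule with all three (mode, count-string) keys.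
  let pairs : List ((String × String) × (List String × List String)) :=
    rules.flatMap (fun rule =>
      [(("RULE", PySem.Int.toStr (rule.1.length : Int) ++ PySem.Int.toStr (rule.2.length : Int)), rule),
       (("HEAD", PySem.Int.toStr (rule.1.length : Int)), rule),
       (("BODY", PySem.Int.toStr (rule.2.length : Int)), rule)])
  -- Stage 2: group into the inverted index (setdefault(tag, []).append(rule)).
  let index : PySem.Dict (String × String) (List (List String × List String)) :=
    pairs.foldl (fun d p => d.modify p.1 [] (· ++ [p.2])) PySem.Dict.empty
  -- Stage 3: one lookup answers the query.
  result ++ index.getD (key, req_count) []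

-- ===== PRECONDITION & SPEC =====
-- Pre_ excludes exactly the inputs where item.split(" ") has fewer than two parts: there A (and B) raise IndexError.
def Pre_template_2_queries_find_rules (result : List (List String × List String)) (item : String) (rules : List (List String × List String)) : Prop :=
  2 ≤ ((PySem.Str.split? item " ").getD []).length
instance (result : List (List String × List String)) (item : String) (rules : List (List String × List String)) : Decidable (Pre_template_2_queries_find_rules result item rules) := by unfold Pre_template_2_queries_find_rules; infer_instance
def pvWitness_template_2_queries_find_rules : (List (List String × List String)) × String × (List (List String × List String)) := ([], "RULE 21", [(["a","b"],["c"]), (["x"],["y"])])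
def Spec_template_2_queries_find_rules (result : List (List String × List String)) (item : String) (rules : List (List String × List String)) (out : List (List String × List String)) : Prop := out = template_2_queries_find_rules_alt result item rules
instance (result : List (List String × List String)) (item : String) (rules : List (List String × List String)) (out : List (List String × List String)) : Decidable (Spec_template_2_queries_find_rules result item rules out) := by unfold Spec_template_2_queries_find_rules; infer_instance

-- ===== CLAIM =====
def Claim_equal_template_2_queries_find_rules : Prop := ∀ (result : List (List String × List String)) (item : String) (rules : List (List String × List String)), Dom_template_2_queries_find_rules result item rules → Pre_template_2_queries_find_rules result item rules → Spec_template_2_queries_find_rules result item rules (template_2_queries_find_rules result item rules)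

-- ===== LEMMAS AND PROOFS =====
-- A's elif cascade, for fixed key/req, is a filter of `rules` by the three-way disjunction.
set_option maxHeartbeats 1000000 in
theorem a_side (key req : String) (result rules : List (List String × List String)) :
    rules.foldl (fun res rule =>
      if key = "RULE" ∧ PySem.Int.toStr (rule.1.length : Int) ++ PySem.Int.toStr (rule.2.length : Int) = req then res ++ [rule]
      else if key = "HEAD" ∧ PySem.Int.toStr (rule.1.length : Int) = req then res ++ [rule]
      else if key = "BODY" ∧ PySem.Int.toStr (rule.2.length : Int) = req then res ++ [rule]
      else res) result
    = result ++ rules.filter (fun rule =>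
        decide ((key = "RULE" ∧ PySem.Int.toStr (rule.1.length : Int) ++ PySem.Int.toStr (rule.2.length : Int) = req) ∨
                (key = "HEAD" ∧ PySem.Int.toStr (rule.1.length : Int) = req) ∨
                (key = "BODY" ∧ PySem.Int.toStr (rule.2.length : Int) = req))) := by
  have hfun : (fun (res : List (List String × List String)) rule =>
      if key = "RULE" ∧ PySem.Int.toStr (rule.1.length : Int) ++ PySem.Int.toStr (rule.2.length : Int) = req then res ++ [rule]
      else if key = "HEAD" ∧ PySem.Int.toStr (rule.1.length : Int) = req then res ++ [rule]
      else if key = "BODY" ∧ PySem.Int.toStr (rule.2.length : Int) = req then res ++ [rule]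
      else res)
      = (fun res rule =>
      if (key = "RULE" ∧ PySem.Int.toStr (rule.1.length : Int) ++ PySem.Int.toStr (rule.2.length : Int) = req) ∨
         (key = "HEAD" ∧ PySem.Int.toStr (rule.1.length : Int) = req) ∨
         (key = "BODY" ∧ PySem.Int.toStr (rule.2.length : Int) = req) then res ++ [rule] else res) := by
    funext res rule
    split_ifs with h1 h2 h3 h4 <;> tauto
  rw [hfun, PySem.List.foldl_append_ite_eq_filter]

-- B's tagged pairs, filtered on the query tag and projected, are exactly A's filter.
theorem tag_filter (key req : String) (rules : List (List String × List String)) :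
    ((rules.flatMap (fun rule =>
        [(("RULE", PySem.Int.toStr (rule.1.length : Int) ++ PySem.Int.toStr (rule.2.length : Int)), rule),
         (("HEAD", PySem.Int.toStr (rule.1.length : Int)), rule),
         (("BODY", PySem.Int.toStr (rule.2.length : Int)), rule)])).filter
        (fun p => p.1 == (key, req))).map (·.2)
    = rules.filter (fun rule =>
        decide ((key = "RULE" ∧ PySem.Int.toStr (rule.1.length : Int) ++ PySem.Int.toStr (rule.2.length : Int) = req) ∨
                (key = "HEAD" ∧ PySem.Int.toStr (rule.1.length : Int) = req) ∨
                (key = "BODY" ∧ PySem.Int.toStr (rule.2.length : Int) = req))) := by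
  induction rules with
  | nil => rfl
  | cons r rest ih =>
    rw [List.flatMap_cons, List.filter_append, List.map_append, ih]
    by_cases h1 : key = "RULE"
    · subst h1
      by_cases hc : PySem.Int.toStr (r.1.length : Int) ++ PySem.Int.toStr (r.2.length : Int) = req <;>
        simp [Prod.ext_iff, hc]
    · by_cases h2 : key = "HEAD"
      · subst h2
        by_cases hc : PySem.Int.toStr (r.1.length : Int) = req <;> simp [Prod.ext_iff, hc]
      · by_cases h3 : key = "BODY"
        · subst h3
          by_cases hc : PySem.Int.toStr (r.2.length : Int) = req <;> simp [Prod.ext_iff, hc]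
        · simp [Prod.ext_iff, Ne.symm h1, Ne.symm h2, Ne.symm h3, h1, h2, h3]

-- ===== VERDICT =====
theorem template_2_queries_find_rules_spec : Claim_equal_template_2_queries_find_rules := by
  intro result item rules _ _
  show template_2_queries_find_rules result item rules = template_2_queries_find_rules_alt result item rules
  simp only [template_2_queries_find_rules, template_2_queries_find_rules_alt]
  rw [a_side, PySem.Dict.getD_foldl_modify_append, PySem.Dict.getD_empty, List.nil_append, tag_filter]
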